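-- pv_equiv track=rewrite | github.com/id523a/Computer12 | Assembler12/Assembler12.py | parse_number_literal
-- ===== SOURCE A (Python) =====
-- number_base_table = {
--     'B': 2, 'b': 2,
--     'O': 8, 'o': 8,
--     'D': 10, 'd': 10,
--     'H': 16, 'h': 16
-- }
--
-- digit_value_table = {
--     '0': 0, '1': 1, '2': 2, '3': 3, '4': 4,
--     '5': 5, '6': 6, '7': 7, '8': 8, '9': 9,
--     'A': 10, 'B': 11, 'C': 12, 'D': 13, 'E': 14, 'F': 15,
--     'a': 10, 'b': 11, 'c': 12, 'd': 13, 'e': 14, 'f': 15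
-- }
--
-- def parse_number_literal(num_str):
--     # Number format : # <base> <sign> <digits>
--     # Base is optional, defaults to decimal
--     # Sign is optional, defaults to positive
--     # Bb = binary, Oo = octal, Dd = decimal, Hh = hex
--     # For example: "#h-2c" is -44
--     iter_str = iter(num_str)
--     sign = 1
--     result = 0
--     result_valid = False
--     try:
--         # Make sure first character is '#'
--         ch = next(iter_str)
--         if (ch != '#'):
--             return None
--         ch = next(iter_str)
--         # Attempt to read base
--         base = number_base_table.get(ch)
--         if base is None:
--             base = 10
--         else:
--             ch = next(iter_str)
--         # Attempt to read sign
--         if ch == '+':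
--             sign = 1
--             ch = next(iter_str)
--         elif ch == '-':
--             sign = -1
--             ch = next(iter_str)
--         # Read digits
--         while True:
--             if ch != '_': # Ignore underscores in digit string
--                 digit_value = digit_value_table.get(ch, -1)
--                 if (digit_value < 0 or digit_value >= base):
--                     return None
--                 result *= base
--                 result += digit_value
--                 result_valid = True
--             ch = next(iter_str)
--     except StopIteration:
--         return sign * result if result_valid else None
-- ===== SOURCE B (Python) =====
-- number_base_table = {
--     'B': 2, 'b': 2,
--     'O': 8, 'o': 8,
--     'D': 10, 'd': 10,
--     'H': 16, 'h': 16
-- }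
--
-- _HEX_DIGITS = "0123456789abcdefABCDEF"
--
-- def parse_number_literal(num_str):
--     # Structural parse: '#', optional base char, optional sign, then a run of
--     # digits validated against the base and handed to built-in int(digits, base).
--     if not num_str.startswith('#'):
--         return None
--     rest = num_str[1:]
--     base = 10
--     if rest and rest[0] in number_base_table:
--         base = number_base_table[rest[0]]
--         rest = rest[1:]
--     sign = 1
--     if rest[:1] == '+':
--         rest = rest[1:]
--     elif rest[:1] == '-':
--         sign = -1
--         rest = rest[1:]
--     digits = rest.replace('_', '')
--     if not digits:
--         return None
--     if any(c not in _HEX_DIGITS or int(c, 16) >= base for c in digits):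
--         return None
--     return sign * int(digits, base)
-- ===== Notes on version B (the rewrite author's own statement) =====
-- stated objective: idiomatic
-- what changed: A's single iterator loop that folds and validates digit by digit with manual sign/base state is replaced by structural parsing: slice off '#', the optional base char and the optional sign, strip underscores, then validate the digit run and convert it in one bulk int(digits, base) call.
import Mathlib
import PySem

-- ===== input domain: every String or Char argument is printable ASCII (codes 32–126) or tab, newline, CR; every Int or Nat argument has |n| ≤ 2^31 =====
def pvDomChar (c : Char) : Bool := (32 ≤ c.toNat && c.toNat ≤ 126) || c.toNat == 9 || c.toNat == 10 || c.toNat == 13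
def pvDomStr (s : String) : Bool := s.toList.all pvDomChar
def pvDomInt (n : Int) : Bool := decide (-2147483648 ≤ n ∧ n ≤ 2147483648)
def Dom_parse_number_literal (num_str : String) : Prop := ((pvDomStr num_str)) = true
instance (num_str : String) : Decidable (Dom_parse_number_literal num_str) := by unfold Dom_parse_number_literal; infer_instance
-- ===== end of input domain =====

-- B replaces A's single fold-and-validate iterator loop by structural slicing:
-- '#', optional base char, optional sign, then one underscore-filtered digit run
-- validated against the base and converted in bulk (int(digits, base) in Source B);
-- idiomatic restructuring, same cost.


-- ===== PORT A =====
-- number_base_table.get ch (lookup in the 8-entry literal dict)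
def pnlBaseOf (c : Char) : Option Int :=
  match c with
  | 'B' | 'b' => some 2
  | 'O' | 'o' => some 8
  | 'D' | 'd' => some 10
  | 'H' | 'h' => some 16
  | _ => none

-- digit_value_table.get ch (-1) (lookup in the 22-entry literal dict, default -1)
def pnlDigitValue (c : Char) : Int :=
  match c with
  | '0' => 0 | '1' => 1 | '2' => 2 | '3' => 3 | '4' => 4
  | '5' => 5 | '6' => 6 | '7' => 7 | '8' => 8 | '9' => 9
  | 'A' | 'a' => 10 | 'B' | 'b' => 11 | 'C' | 'c' => 12
  | 'D' | 'd' => 13 | 'E' | 'e' => 14 | 'F' | 'f' => 15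
  | _ => -1

-- A's 'while True' digit loop; [] plays StopIteration (return sign*result if valid, else None)
def pnlDigits (base sign : Int) : Int → Bool → List Char → Option Int
  | result, valid, [] => if valid then some (sign * result) else none
  | result, valid, c :: rest =>
    if c ≠ '_' then
      let dv := pnlDigitValue c
      if dv < 0 ∨ dv ≥ base then none
      else pnlDigits base sign (result * base + dv) true rest
    else pnlDigits base sign result valid rest

-- A's optional-sign step; ch was already consumed by the base step when the list is [] here
def pnlSign (base : Int) : List Char → Option Int
  | [] => none
  | c :: rest =>
    if c = '+' then pnlDigits base 1 0 false rest
    else if c = '-' then pnlDigits base (-1) 0 false rest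
    else pnlDigits base 1 0 false (c :: rest)

def parse_number_literal (num_str : String) : Option Int :=
  match num_str.toList with
  | [] => none                      -- StopIteration on the first next(), result_valid False
  | c :: rest =>
    if c ≠ '#' then none
    else match rest with
      | [] => none                  -- StopIteration reading the base position
      | c2 :: rest2 =>
        match pnlBaseOf c2 with
        | none => pnlSign 10 (c2 :: rest2)
        | some b => pnlSign b rest2

-- ===== PORT B =====
def pnlAltBaseChars : List Char := ['B', 'b', 'O', 'o', 'D', 'd', 'H', 'h']

-- number_base_table[c]; only evaluated under the membership guard, so the
-- default branch is unreachable in parse_number_literal_alt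
def pnlAltBaseVal (c : Char) : Int :=
  match c with
  | 'B' | 'b' => 2
  | 'O' | 'o' => 8
  | 'D' | 'd' => 10
  | _ => 16

def pnlHexDigits : List Char :=
  ['0','1','2','3','4','5','6','7','8','9','a','b','c','d','e','f','A','B','C','D','E','F']

-- int(c, 16) for a single char; exact on pnlHexDigits (the only place B uses it)
def pnlHexVal (c : Char) : Int :=
  match c with
  | '1' => 1 | '2' => 2 | '3' => 3 | '4' => 4 | '5' => 5
  | '6' => 6 | '7' => 7 | '8' => 8 | '9' => 9
  | 'A' | 'a' => 10 | 'B' | 'b' => 11 | 'C' | 'c' => 12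
  | 'D' | 'd' => 13 | 'E' | 'e' => 14 | 'F' | 'f' => 15
  | _ => 0

-- built-in int(digits, base); exact for nonempty hex-digit strings whose per-char
-- values are all < base — the only way B calls it (B pre-validates the digits)
def pnlIntBase (base : Int) (ds : List Char) : Int :=
  ds.foldl (fun a c => a * base + pnlHexVal c) 0

def parse_number_literal_alt (num_str : String) : Option Int :=
  match num_str.toList with
  | [] => none                      -- not num_str.startswith('#')
  | c :: rest0 =>
    if c ≠ '#' then none else
    let p1 : Int × List Char :=     -- (base, rest) after the optional base char
      match rest0 with
      | [] => (10, [])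
      | c2 :: r2 => if c2 ∈ pnlAltBaseChars then (pnlAltBaseVal c2, r2) else (10, c2 :: r2)
    let p2 : Int × List Char :=     -- (sign, rest) after the optional sign
      match p1.2 with
      | '+' :: r => (1, r)
      | '-' :: r => (-1, r)
      | r => (1, r)
    let digits := p2.2.filter (· ≠ '_')     -- rest.replace('_', '')
    if digits.isEmpty then none
    else if digits.any (fun d => decide (d ∉ pnlHexDigits) || decide (pnlHexVal d ≥ p1.1)) then none
    else some (p2.1 * pnlIntBase p1.1 digits)

-- ===== PRECONDITION & SPEC =====
def Spec_parse_number_literal (num_str : String) (out : Option Int) : Prop := out = parse_number_literal_alt num_str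
instance (num_str : String) (out : Option Int) : Decidable (Spec_parse_number_literal num_str out) := by unfold Spec_parse_number_literal; infer_instance

-- ===== CLAIM (what is proved, stated in full; the proofs are below) =====
def Claim_equal_parse_number_literal : Prop := ∀ (num_str : String), Dom_parse_number_literal num_str → Spec_parse_number_literal num_str (parse_number_literal num_str)

-- ===== LEMMAS AND PROOFS =====

-- per-char facts about the two digit tables
lemma hex_dv : ∀ c ∈ pnlHexDigits, pnlDigitValue c = pnlHexVal c ∧ 0 ≤ pnlDigitValue c := by
  intro c hc; fin_cases hc <;> exact ⟨rfl, by decide⟩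

lemma dv_ne_neg_one_mem : ∀ c : Char, pnlDigitValue c ≠ -1 → c ∈ pnlHexDigits := by
  intro c h
  unfold pnlDigitValue at h
  split at h <;> first | decide | simp at h

lemma nonhex_dv (c : Char) (h : c ∉ pnlHexDigits) : pnlDigitValue c = -1 := by
  by_contra hne; exact h (dv_ne_neg_one_mem c hne)

lemma base_mem : ∀ c ∈ pnlAltBaseChars, pnlBaseOf c = some (pnlAltBaseVal c) := by
  intro c hc; fin_cases hc <;> rfl

lemma baseOf_ne_none_mem : ∀ c : Char, pnlBaseOf c ≠ none → c ∈ pnlAltBaseChars := by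
  intro c h
  unfold pnlBaseOf at h
  split at h <;> first | decide | simp at h

lemma base_nonmem (c : Char) (h : c ∉ pnlAltBaseChars) : pnlBaseOf c = none := by
  by_contra hne; exact h (baseOf_ne_none_mem c hne)

-- characterisation of A's digit loop as one filter + one validity check + one fold
lemma pnlDigits_eq (base sign : Int) :
    ∀ (cs : List Char) (r : Int) (v : Bool),
      pnlDigits base sign r v cs =
        (let ds := cs.filter (· ≠ '_')
         if ds.any (fun c => decide (pnlDigitValue c < 0) || decide (pnlDigitValue c ≥ base)) then none
         else if ds.isEmpty && !v then none
         else some (sign * ds.foldl (fun a c => a * base + pnlDigitValue c) r)) := by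
  intro cs
  induction cs with
  | nil => intro r v; cases v <;> simp [pnlDigits]
  | cons c rest ih =>
    intro r v
    by_cases hc : c = '_'
    · subst hc; simpa [pnlDigits, List.filter_cons] using ih r v
    · have hf : (c :: rest).filter (· ≠ '_') = c :: rest.filter (· ≠ '_') := by
        simp [List.filter_cons, hc]
      by_cases hbad : pnlDigitValue c < 0 ∨ pnlDigitValue c ≥ base
      · have : (decide (pnlDigitValue c < 0) || decide (pnlDigitValue c ≥ base)) = true := by
          rcases hbad with h | h <;> simp [h]
        simp [pnlDigits, hc, hbad, hf, this]
      · push_neg at hbad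
        have hdec : (decide (pnlDigitValue c < 0) || decide (pnlDigitValue c ≥ base)) = false := by
          simp; omega
        rw [show pnlDigits base sign r v (c :: rest) =
            pnlDigits base sign (r * base + pnlDigitValue c) true rest by
          simp [pnlDigits, hc]; intro h; omega]
        rw [ih, hf]
        simp only [List.any_cons, hdec, Bool.false_or, List.isEmpty_cons, Bool.false_and,
          Bool.not_true, Bool.and_false, List.foldl_cons, Bool.false_eq_true, if_false]

-- A's per-digit validity test agrees with B's (hex-membership + value-below-base) test
lemma any_bad_same (base : Int) (ds : List Char) :
    (ds.any fun c => decide (pnlDigitValue c < 0) || decide (pnlDigitValue c ≥ base)) =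
      (ds.any fun d => decide (d ∉ pnlHexDigits) || decide (pnlHexVal d ≥ base)) := by
  apply List.any_congr rfl
  intro c
  by_cases hmem : c ∈ pnlHexDigits
  · obtain ⟨he, hge⟩ := hex_dv c hmem
    have h1 : decide (pnlDigitValue c < 0) = false := by simp; omega
    have h2 : decide (c ∉ pnlHexDigits) = false := by simp [hmem]
    rw [h1, h2, he]
  · have h1 : decide (pnlDigitValue c < 0) = true := by simp [nonhex_dv c hmem]
    have h2 : decide (c ∉ pnlHexDigits) = true := by simp [hmem]
    rw [h1, h2, Bool.true_or, Bool.true_or]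

-- A's digit loop started fresh (r = 0, valid = False) equals B's digit-run processing
lemma digits_tail_eq (base sign : Int) (cs : List Char) :
    pnlDigits base sign 0 false cs =
      (let ds := cs.filter (· ≠ '_')
       if ds.isEmpty then none
       else if ds.any (fun d => decide (d ∉ pnlHexDigits) || decide (pnlHexVal d ≥ base)) then none
       else some (sign * pnlIntBase base ds)) := by
  rw [pnlDigits_eq]
  set ds := cs.filter (· ≠ '_') with hds
  show (if ds.any (fun c => decide (pnlDigitValue c < 0) || decide (pnlDigitValue c ≥ base)) then none
         else if ds.isEmpty && !false then none
         else some (sign * ds.foldl (fun a c => a * base + pnlDigitValue c) 0)) = _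
  rw [any_bad_same]
  by_cases hempty : ds.isEmpty
  · have : ds = [] := List.isEmpty_iff.mp hempty
    simp [this]
  · by_cases hbad : ds.any (fun d => decide (d ∉ pnlHexDigits) || decide (pnlHexVal d ≥ base))
    · simp only [hbad, if_true, hempty, Bool.false_eq_true, if_false, if_true]
    · have hfold : ds.foldl (fun a c => a * base + pnlDigitValue c) 0 = pnlIntBase base ds := by
        unfold pnlIntBase
        apply List.foldl_ext
        intro a c hm
        have hmem : c ∈ pnlHexDigits := by
          by_contra hmem
          rw [List.any_eq_true] at hbad
          exact hbad ⟨c, hm, by simp [hmem]⟩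
        rw [(hex_dv c hmem).1]
      simp only [hbad, Bool.false_eq_true, if_false, hfold]
      simp [hempty]

-- A's sign step against B's sign split, for a common base and remaining characters
lemma sign_eq (base : Int) (cs : List Char) :
    pnlSign base cs =
      (let p2 : Int × List Char :=
        match cs with
        | '+' :: r => (1, r)
        | '-' :: r => (-1, r)
        | r => (1, r)
       let digits := p2.2.filter (· ≠ '_')
       if digits.isEmpty then none
       else if digits.any (fun d => decide (d ∉ pnlHexDigits) || decide (pnlHexVal d ≥ base)) then none
       else some (p2.1 * pnlIntBase base digits)) := by
  match cs with
  | [] => simp [pnlSign]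
  | c :: rest =>
    by_cases h1 : c = '+'
    · subst h1; exact digits_tail_eq base 1 rest
    · by_cases h2 : c = '-'
      · subst h2; exact digits_tail_eq base (-1) rest
      · have hL : pnlSign base (c :: rest) = pnlDigits base 1 0 false (c :: rest) := by
          simp [pnlSign, h1, h2]
        have hR : (match c :: rest with
            | '+' :: r => ((1 : Int), r)
            | '-' :: r => (-1, r)
            | r => (1, r)) = (1, c :: rest) := by
          simp [h1, h2]
        rw [hL, hR, digits_tail_eq]

-- the base step: A's dict-get dispatch against B's membership test, for '#' :: c2 :: rest2
lemma main_cons (c2 : Char) (rest2 : List Char) :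
    (match pnlBaseOf c2 with
      | none => pnlSign 10 (c2 :: rest2)
      | some b => pnlSign b rest2) =
      (let p1 : Int × List Char :=
        if c2 ∈ pnlAltBaseChars then (pnlAltBaseVal c2, rest2) else (10, c2 :: rest2)
       let p2 : Int × List Char :=
        match p1.2 with
        | '+' :: r => (1, r)
        | '-' :: r => (-1, r)
        | r => (1, r)
       let digits := p2.2.filter (· ≠ '_')
       if digits.isEmpty then none
       else if digits.any (fun d => decide (d ∉ pnlHexDigits) || decide (pnlHexVal d ≥ p1.1)) then none
       else some (p2.1 * pnlIntBase p1.1 digits)) := by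
  by_cases hmem : c2 ∈ pnlAltBaseChars
  · rw [base_mem c2 hmem]
    show pnlSign (pnlAltBaseVal c2) rest2 = _
    simp only [hmem, if_true]
    exact sign_eq (pnlAltBaseVal c2) rest2
  · rw [base_nonmem c2 hmem]
    show pnlSign 10 (c2 :: rest2) = _
    simp only [hmem, if_false]
    exact sign_eq 10 (c2 :: rest2)

-- ===== VERDICT (by name: the statement is the Claim_ definition above) =====
theorem parse_number_literal_spec : Claim_equal_parse_number_literal := by
  intro s _
  show parse_number_literal s = parse_number_literal_alt s
  unfold parse_number_literal parse_number_literal_alt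
  match s.toList with
  | [] => rfl
  | c :: rest =>
    by_cases hc : c = '#'
    · subst hc
      simp only [if_neg (by decide : ¬('#' ≠ '#'))]
      match rest with
      | [] => rfl
      | c2 :: rest2 => exact main_cons c2 rest2
    · simp [hc]
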